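-- pv_equiv track=rewrite | github.com/Willou-Gillou/stremio-jackett | utils/filter_results.py | series_file_filter
-- ===== SOURCE A (Python) =====
-- def series_file_filter(files, season, episode):
--     if season is None or episode is None:
--         return []
--
--     season = season.lower()
--     episode = episode.lower()
--
--     def filter_files(predicate):
--         return [file for file in files if predicate(file['path'].lower())]
--
--     # Main filter
--     filtered_files = filter_files(lambda path: season + episode in path)
--     if filtered_files:
--         return filtered_files
--
--     # Secondary fallback filter
--     filtered_files = filter_files(lambda path: season in path and episode in path)
--     if filtered_files:
--         return filtered_files
--
--     # Third fallback filter
--     season = season[1:]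
--     episode = episode[1:]
--     filtered_files = filter_files(lambda path: season in path and episode in path and path.index(season) > path.index(episode))
--     if filtered_files:
--         return filtered_files
--
--     # Last fallback filter
--     season = season.lstrip('0')
--     episode = episode.lstrip('0')
--     filtered_files = filter_files(lambda path: season in path and episode in path and path.index(season) > path.index(episode))
--     return filtered_files
-- ===== SOURCE B (Python) =====
-- def series_file_filter(files, season, episode):
--     if season is None or episode is None:
--         return []
--
--     s = season.lower()
--     e = episode.lower()
--     s3 = s[1:]
--     e3 = e[1:]
--     s4 = s3.lstrip('0')
--     e4 = e3.lstrip('0')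
--
--     b1, b2, b3, b4 = [], [], [], []
--     for file in files:
--         path = file['path'].lower()
--         if s + e in path:
--             b1.append(file)
--         elif s in path and e in path:
--             b2.append(file)
--         elif s3 in path and e3 in path and path.index(s3) > path.index(e3):
--             b3.append(file)
--         elif s4 in path and e4 in path and path.index(s4) > path.index(e4):
--             b4.append(file)
--     return b1 or b2 or b3 or b4
-- ===== Notes on version B (the rewrite author's own statement) =====
-- stated objective: alternative
-- what changed: B precomputes the four season/episode variants and makes a single pass over the files, lowercasing each path once and bucketing each file into the first stage whose predicate it satisfies, then returns the first non-empty bucket, instead of A's up-to-four separate filter passes that each re-lowercase every path.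
import Mathlib
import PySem

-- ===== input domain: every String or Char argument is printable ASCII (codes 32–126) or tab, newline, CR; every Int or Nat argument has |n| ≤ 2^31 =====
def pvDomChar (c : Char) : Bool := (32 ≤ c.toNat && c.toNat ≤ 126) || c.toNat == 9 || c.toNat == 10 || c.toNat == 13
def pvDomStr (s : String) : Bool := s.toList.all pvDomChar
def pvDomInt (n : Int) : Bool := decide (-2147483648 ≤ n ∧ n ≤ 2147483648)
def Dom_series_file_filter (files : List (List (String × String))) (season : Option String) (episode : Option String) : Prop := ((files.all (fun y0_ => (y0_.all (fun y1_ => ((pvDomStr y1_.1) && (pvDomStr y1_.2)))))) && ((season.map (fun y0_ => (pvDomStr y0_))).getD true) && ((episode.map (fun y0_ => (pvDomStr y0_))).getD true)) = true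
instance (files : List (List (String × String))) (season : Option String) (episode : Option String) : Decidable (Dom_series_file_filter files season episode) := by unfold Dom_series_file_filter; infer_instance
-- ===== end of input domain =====

-- B replaces A's up-to-four filter passes by one bucketing pass over the files (return value only; neither version mutates its arguments).

-- ===== PORT A =====
-- file['path'] (Pre_ guarantees the key is present; Python raises KeyError otherwise)
def pvPath (file : List (String × String)) : String :=
  ((PySem.Dict.mk file).get? "path").getD ""

-- s.lstrip('0'): drop leading '0' characters; exact
def pvLstrip0 (s : String) : String :=
  String.mk (s.toList.dropWhile (fun c => c == '0'))

-- path.index(x) is ported as PySem.Str.find, exact here because the '&&' short-circuit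
-- guarantees 'x in path' before it is consulted, just as in the Python.
def series_file_filter (files : List (List (String × String))) (season : Option String) (episode : Option String) : List (List (String × String)) :=
  match season, episode with
  | none, _ => []
  | some _, none => []
  | some season, some episode =>
    let season := PySem.Str.lower season
    let episode := PySem.Str.lower episode
    let f1 := files.filter (fun file => PySem.Str.isIn (season ++ episode) (PySem.Str.lower (pvPath file)))
    if f1 ≠ [] then f1 else
    let f2 := files.filter (fun file => PySem.Str.isIn season (PySem.Str.lower (pvPath file)) && PySem.Str.isIn episode (PySem.Str.lower (pvPath file)))
    if f2 ≠ [] then f2 else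
    let season2 := PySem.Str.slice season (some 1) none
    let episode2 := PySem.Str.slice episode (some 1) none
    let f3 := files.filter (fun file => PySem.Str.isIn season2 (PySem.Str.lower (pvPath file)) && (PySem.Str.isIn episode2 (PySem.Str.lower (pvPath file)) && decide (PySem.Str.find (PySem.Str.lower (pvPath file)) season2 > PySem.Str.find (PySem.Str.lower (pvPath file)) episode2)))
    if f3 ≠ [] then f3 else
    let season3 := pvLstrip0 season2
    let episode3 := pvLstrip0 episode2
    files.filter (fun file => PySem.Str.isIn season3 (PySem.Str.lower (pvPath file)) && (PySem.Str.isIn episode3 (PySem.Str.lower (pvPath file)) && decide (PySem.Str.find (PySem.Str.lower (pvPath file)) season3 > PySem.Str.find (PySem.Str.lower (pvPath file)) episode3)))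

-- ===== PORT B =====
-- the loop body of Source B: lowercase the path once, bucket the file into the first matching stage
def pvBucketStep (s e s3 e3 s4 e4 : String)
    (acc : List (List (String × String)) × List (List (String × String)) × List (List (String × String)) × List (List (String × String)))
    (file : List (String × String)) :
    List (List (String × String)) × List (List (String × String)) × List (List (String × String)) × List (List (String × String)) :=
  match acc with
  | (b1, b2, b3, b4) =>
    let path := PySem.Str.lower (pvPath file)
    if PySem.Str.isIn (s ++ e) path then (b1 ++ [file], b2, b3, b4)
    else if PySem.Str.isIn s path && PySem.Str.isIn e path then (b1, b2 ++ [file], b3, b4)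
    else if PySem.Str.isIn s3 path && (PySem.Str.isIn e3 path && decide (PySem.Str.find path s3 > PySem.Str.find path e3)) then (b1, b2, b3 ++ [file], b4)
    else if PySem.Str.isIn s4 path && (PySem.Str.isIn e4 path && decide (PySem.Str.find path s4 > PySem.Str.find path e4)) then (b1, b2, b3, b4 ++ [file])
    else (b1, b2, b3, b4)

def series_file_filter_alt (files : List (List (String × String))) (season : Option String) (episode : Option String) : List (List (String × String)) :=
  match season, episode with
  | none, _ => []
  | some _, none => []
  | some season, some episode =>
    let s := PySem.Str.lower season
    let e := PySem.Str.lower episode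
    let s3 := PySem.Str.slice s (some 1) none
    let e3 := PySem.Str.slice e (some 1) none
    let s4 := pvLstrip0 s3
    let e4 := pvLstrip0 e3
    match files.foldl (pvBucketStep s e s3 e3 s4 e4) ([], [], [], []) with
    | (b1, b2, b3, b4) => if b1 ≠ [] then b1 else if b2 ≠ [] then b2 else if b3 ≠ [] then b3 else b4

-- ===== PRECONDITION & SPEC =====
-- Pre_ excludes only the inputs on which Python A raises KeyError: both season and episode
-- given and some file without a 'path' key.
def Pre_series_file_filter (files : List (List (String × String))) (season : Option String) (episode : Option String) : Prop :=
  season.isSome = true → episode.isSome = true → ∀ file ∈ files, ((PySem.Dict.mk file).get? "path").isSome = true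
instance (files : List (List (String × String))) (season : Option String) (episode : Option String) : Decidable (Pre_series_file_filter files season episode) := by unfold Pre_series_file_filter; infer_instance

def pvWitness_series_file_filter : (List (List (String × String))) × Option String × Option String :=
  ([[("path", "Show.S01E02.mkv")], [("path", "other")]], some "S01", some "E02")

def Spec_series_file_filter (files : List (List (String × String))) (season : Option String) (episode : Option String) (out : List (List (String × String))) : Prop := out = series_file_filter_alt files season episode
instance (files : List (List (String × String))) (season : Option String) (episode : Option String) (out : List (List (String × String))) : Decidable (Spec_series_file_filter files season episode out) := by unfold Spec_series_file_filter; infer_instance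

-- ===== CLAIM (what is proved, stated in full; the proofs are below) =====
def Claim_equal_series_file_filter : Prop := ∀ (files : List (List (String × String))) (season : Option String) (episode : Option String), Dom_series_file_filter files season episode → Pre_series_file_filter files season episode → Spec_series_file_filter files season episode (series_file_filter files season episode)

-- ===== LEMMAS AND PROOFS =====

-- the stage predicates, named for the proofs
def pvQ1 (s e : String) (file : List (String × String)) : Bool :=
  PySem.Str.isIn (s ++ e) (PySem.Str.lower (pvPath file))
def pvQ2 (s e : String) (file : List (String × String)) : Bool :=
  PySem.Str.isIn s (PySem.Str.lower (pvPath file)) && PySem.Str.isIn e (PySem.Str.lower (pvPath file))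
def pvQ3 (s e : String) (file : List (String × String)) : Bool :=
  PySem.Str.isIn s (PySem.Str.lower (pvPath file)) && (PySem.Str.isIn e (PySem.Str.lower (pvPath file)) && decide (PySem.Str.find (PySem.Str.lower (pvPath file)) s > PySem.Str.find (PySem.Str.lower (pvPath file)) e))

-- the bucketing step with abstract predicates
def pvStep4 {α : Type} (q1 q2 q3 q4 : α → Bool)
    (acc : List α × List α × List α × List α) (x : α) : List α × List α × List α × List α :=
  match acc with
  | (b1, b2, b3, b4) =>
    if q1 x then (b1 ++ [x], b2, b3, b4)
    else if q2 x then (b1, b2 ++ [x], b3, b4)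
    else if q3 x then (b1, b2, b3 ++ [x], b4)
    else if q4 x then (b1, b2, b3, b4 ++ [x])
    else (b1, b2, b3, b4)

theorem pvBucketStep_eq (s e s3 e3 s4 e4 : String) :
    pvBucketStep s e s3 e3 s4 e4 = pvStep4 (pvQ1 s e) (pvQ2 s e) (pvQ3 s3 e3) (pvQ3 s4 e4) := rfl

-- the single pass computes the four stage filters, each later stage restricted to the
-- files rejected by all earlier stages
theorem pvStep4_spec {α : Type} (q1 q2 q3 q4 : α → Bool) (l : List α) (b1 b2 b3 b4 : List α) :
    l.foldl (pvStep4 q1 q2 q3 q4) (b1, b2, b3, b4) =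
      (b1 ++ l.filter q1,
       b2 ++ l.filter (fun x => !q1 x && q2 x),
       b3 ++ l.filter (fun x => !q1 x && (!q2 x && q3 x)),
       b4 ++ l.filter (fun x => !q1 x && (!q2 x && (!q3 x && q4 x)))) := by
  induction l generalizing b1 b2 b3 b4 with
  | nil => simp
  | cons x l ih =>
    rw [List.foldl_cons, pvStep4]
    by_cases h1 : q1 x
    · simp [h1, ih, List.append_assoc]
    · by_cases h2 : q2 x
      · simp [h1, h2, ih, List.append_assoc]
      · by_cases h3 : q3 x
        · simp [h1, h2, h3, ih, List.append_assoc]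
        · by_cases h4 : q4 x
          · simp [h1, h2, h3, h4, ih, List.append_assoc]
          · simp [h1, h2, h3, h4, ih]

-- first non-empty bucket of the single pass = first non-empty filter of the stage chain
theorem pvMain {α : Type} [DecidableEq α] (q1 q2 q3 q4 : α → Bool) (l : List α) :
    (if l.filter q1 ≠ [] then l.filter q1 else
     if l.filter q2 ≠ [] then l.filter q2 else
     if l.filter q3 ≠ [] then l.filter q3 else l.filter q4) =
    (match l.foldl (pvStep4 q1 q2 q3 q4) ([], [], [], []) with
     | (b1, b2, b3, b4) => if b1 ≠ [] then b1 else if b2 ≠ [] then b2 else if b3 ≠ [] then b3 else b4) := by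
  rw [pvStep4_spec]
  simp only [List.nil_append]
  by_cases h1 : l.filter q1 = []
  · have h1' := List.filter_eq_nil_iff.mp h1
    rw [List.filter_congr (p := fun x => !q1 x && q2 x) (q := q2)
          (fun x hx => by simp [h1' x hx])]
    by_cases h2 : l.filter q2 = []
    · have h2' := List.filter_eq_nil_iff.mp h2
      rw [List.filter_congr (p := fun x => !q1 x && (!q2 x && q3 x)) (q := q3)
            (fun x hx => by simp [h1' x hx, h2' x hx])]
      by_cases h3 : l.filter q3 = []
      · have h3' := List.filter_eq_nil_iff.mp h3
        rw [List.filter_congr (p := fun x => !q1 x && (!q2 x && (!q3 x && q4 x))) (q := q4)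
              (fun x hx => by simp [h1' x hx, h2' x hx, h3' x hx])]
      · simp [h1, h2, h3]
    · simp [h1, h2]
  · simp [h1]

-- ===== VERDICT (by name: the statement is the Claim_ definition above) =====
theorem series_file_filter_spec : Claim_equal_series_file_filter := by
  intro files season episode _ _
  unfold Spec_series_file_filter
  match season, episode with
  | none, _ => rfl
  | some _, none => rfl
  | some s0, some e0 =>
    simp only [series_file_filter, series_file_filter_alt]
    rw [pvBucketStep_eq]
    exact pvMain (pvQ1 (PySem.Str.lower s0) (PySem.Str.lower e0))
      (pvQ2 (PySem.Str.lower s0) (PySem.Str.lower e0))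
      (pvQ3 (PySem.Str.slice (PySem.Str.lower s0) (some 1) none) (PySem.Str.slice (PySem.Str.lower e0) (some 1) none))
      (pvQ3 (pvLstrip0 (PySem.Str.slice (PySem.Str.lower s0) (some 1) none)) (pvLstrip0 (PySem.Str.slice (PySem.Str.lower e0) (some 1) none)))
      files
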